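-- pv_equiv track=rewrite | github.com/Reptarus/five-parsecs-campaign-manager | fixes/gdscript_linter_fixer.py | fix_missing_type_definitions
-- ===== SOURCE A (Python) =====
-- def fix_missing_type_definitions(content: str) -> str:
--     """
--     Fix FPCM_ prefixed types that don't exist
--     Strategy: Remove prefix and use actual class names
--     """
--     # Map FPCM_ prefixes to actual classes
--     type_replacements = {
--         'FPCM_UnifiedTerrainSystem': 'UnifiedTerrainSystem',
--         'FPCM_PreBattleUI': 'Node',  # Generic fallback until proper typing
--         'FPCM_CampaignManager': 'CampaignManager',
--         'FPCM_Character': 'Character'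
--     }
--
--     for old_type, new_type in type_replacements.items():
--         content = content.replace(old_type, new_type)
--
--     return content
-- ===== SOURCE B (Python) =====
-- def fix_missing_type_definitions(content: str) -> str:
--     """Single left-to-right scan replacing FPCM_ type names via one table lookup pass."""
--     type_replacements = {
--         'FPCM_UnifiedTerrainSystem': 'UnifiedTerrainSystem',
--         'FPCM_PreBattleUI': 'Node',
--         'FPCM_CampaignManager': 'CampaignManager',
--         'FPCM_Character': 'Character',
--     }
--     pieces = []
--     i = 0
--     n = len(content)
--     while i < n:
--         for old_type, new_type in type_replacements.items():
--             if content.startswith(old_type, i):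
--                 pieces.append(new_type)
--                 i += len(old_type)
--                 break
--         else:
--             pieces.append(content[i])
--             i += 1
--     return ''.join(pieces)
-- ===== Notes on version B (the rewrite author's own statement) =====
-- stated objective: alternative
-- what changed: Replaces A's four sequential full-string str.replace passes by a single left-to-right scan that at each position tries the replacement table once and emits either a mapped class name or the current character.
import Mathlib
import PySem

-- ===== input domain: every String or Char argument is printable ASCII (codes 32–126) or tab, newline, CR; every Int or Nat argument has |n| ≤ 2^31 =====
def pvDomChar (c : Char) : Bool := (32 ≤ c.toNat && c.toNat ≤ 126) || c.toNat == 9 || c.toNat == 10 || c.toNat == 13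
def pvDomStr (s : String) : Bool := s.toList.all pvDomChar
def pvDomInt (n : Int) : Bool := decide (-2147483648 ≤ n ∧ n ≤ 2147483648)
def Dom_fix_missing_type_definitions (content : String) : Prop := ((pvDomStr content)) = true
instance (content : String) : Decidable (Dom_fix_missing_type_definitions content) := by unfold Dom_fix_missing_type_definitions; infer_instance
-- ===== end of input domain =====

-- B replaces A's four sequential full-string replace passes by a single left-to-right
-- table-driven scan (alternative decomposition, same result).


-- ===== PORT A =====
def fix_missing_type_definitions (content : String) : String :=
  -- four sequential replace passes, dict iteration order
  let c1 := PySem.Str.replace content "FPCM_UnifiedTerrainSystem" "UnifiedTerrainSystem"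
  let c2 := PySem.Str.replace c1 "FPCM_PreBattleUI" "Node"
  let c3 := PySem.Str.replace c2 "FPCM_CampaignManager" "CampaignManager"
  PySem.Str.replace c3 "FPCM_Character" "Character"

-- ===== PORT B =====
-- the replacement table, in Source B's dict order
def fpcmTable : List (List Char × List Char) :=
  [("FPCM_UnifiedTerrainSystem".toList, "UnifiedTerrainSystem".toList),
   ("FPCM_PreBattleUI".toList, "Node".toList),
   ("FPCM_CampaignManager".toList, "CampaignManager".toList),
   ("FPCM_Character".toList, "Character".toList)]

-- single left-to-right scan: at each position try the table once (first match wins),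
-- emit the mapped value and skip the key, else copy the character
-- (the !isEmpty guard only makes termination evident; every table key is nonempty)
def mrepl (T : List (List Char × List Char)) (s : List Char) : List Char :=
  match s with
  | [] => []
  | c :: t =>
    match h : T.find? (fun p => !p.1.isEmpty && p.1.isPrefixOf (c :: t)) with
    | some kv => kv.2 ++ mrepl T ((c :: t).drop kv.1.length)
    | none => c :: mrepl T t
termination_by s.length
decreasing_by
  · have hmem := List.find?_some h
    simp at hmem
    have : kv.1 ≠ [] := by
      intro he; rw [he] at hmem; simp at hmem
    have : 0 < kv.1.length := List.length_pos_iff.mpr this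
    simp [List.length_drop]; omega
  · simp

def fix_missing_type_definitions_alt (content : String) : String :=
  String.ofList (mrepl fpcmTable content.toList)

-- ===== PRECONDITION & SPEC =====
def Spec_fix_missing_type_definitions (content : String) (out : String) : Prop := out = fix_missing_type_definitions_alt content
instance (content : String) (out : String) : Decidable (Spec_fix_missing_type_definitions content out) := by unfold Spec_fix_missing_type_definitions; infer_instance

-- ===== CLAIM (what is proved, stated in full; the proofs are below) =====
def Claim_equal_fix_missing_type_definitions : Prop := ∀ (content : String), Dom_fix_missing_type_definitions content → Spec_fix_missing_type_definitions content (fix_missing_type_definitions content)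


-- ===== LEMMAS AND PROOFS =====

-- mrepl unfolding on nil
theorem mrepl_nil (T : List (List Char × List Char)) : mrepl T [] = [] := by
  rw [mrepl.eq_def]

-- mrepl unfolding on cons, match case
theorem mrepl_cons_some (T : List (List Char × List Char)) (c : Char) (t : List Char)
    (kv : List Char × List Char)
    (h : T.find? (fun p => !p.1.isEmpty && p.1.isPrefixOf (c :: t)) = some kv) :
    mrepl T (c :: t) = kv.2 ++ mrepl T ((c :: t).drop kv.1.length) := by
  rw [mrepl.eq_def]
  split
  · rename_i heq; simp at heq
  · rename_i c' t' heq
    injection heq with h1 h2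
    subst h1; subst h2
    split
    · rename_i kv' heq2
      rw [h] at heq2; injection heq2 with h3; subst h3; rfl
    · rename_i heq2
      rw [h] at heq2; cases heq2

-- mrepl unfolding on cons, no-match case
theorem mrepl_cons_none (T : List (List Char × List Char)) (c : Char) (t : List Char)
    (h : T.find? (fun p => !p.1.isEmpty && p.1.isPrefixOf (c :: t)) = none) :
    mrepl T (c :: t) = c :: mrepl T t := by
  rw [mrepl.eq_def]
  split
  · rename_i heq; simp at heq
  · rename_i c' t' heq
    injection heq with h1 h2
    subst h1; subst h2
    split
    · rename_i kv' heq2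
      rw [h] at heq2; cases heq2
    · rfl

-- a prefix of b ++ X is comparable with b
theorem prefix_append_cases {a b X : List Char} (h : a <+: b ++ X) : a <+: b ∨ b <+: a :=
  List.prefix_or_prefix_of_prefix h (List.prefix_append b X)

-- if no key of T can match at any position inside p (for any continuation), the scan copies p
theorem mrepl_skip (T : List (List Char × List Char)) (p X : List Char)
    (hsep : ∀ j, j < p.length → ∀ kv ∈ T, ¬ kv.1 <+: p.drop j ∧ ¬ p.drop j <+: kv.1) :
    mrepl T (p ++ X) = p ++ mrepl T X := by
  induction p with
  | nil => simp
  | cons c p' ih =>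
    have hnone : T.find? (fun q => !q.1.isEmpty && q.1.isPrefixOf (c :: (p' ++ X))) = none := by
      apply List.find?_eq_none.mpr
      intro kv hkv
      simp only [Bool.and_eq_true, Bool.not_eq_true', not_and, List.isPrefixOf_iff_prefix]
      intro _ hpre
      have hc := prefix_append_cases (a := kv.1) (b := c :: p') (X := X) hpre
      have hs := hsep 0 (by simp) kv hkv
      simp only [List.drop_zero] at hs
      tauto
    have ih' := ih (by
      intro j hj kv hkv
      have := hsep (j+1) (by simpa using Nat.succ_lt_succ hj) kv hkv
      simpa using this)
    rw [show (c :: p') ++ X = c :: (p' ++ X) from rfl, mrepl_cons_none T _ _ hnone, ih']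
    rfl

-- if w is incomparable with every value of T at every cut, a prefix of the scan output
-- whose characters survive must already be a prefix of the input
theorem nopfx (T : List (List Char × List Char)) :
    ∀ (t w : List Char), w ≠ [] →
    (∀ j, j < w.length → ∀ kv ∈ T, ¬ kv.2 <+: w.drop j ∧ ¬ w.drop j <+: kv.2) →
    w <+: mrepl T t → w <+: t := by
  intro t
  induction t with
  | nil =>
    intro w hw _ hpre
    rw [mrepl_nil] at hpre
    exact absurd (List.prefix_nil.mp hpre) hw
  | cons c t' ih =>
    intro w hw hsep hpre
    cases hf : List.find? (fun p => !p.1.isEmpty && p.1.isPrefixOf (c :: t')) T with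
    | some kv =>
      rw [mrepl_cons_some T c t' kv hf] at hpre
      have hkv : kv ∈ T := List.mem_of_find?_eq_some hf
      have h0 := hsep 0 (by cases w with | nil => exact absurd rfl hw | cons a b => simp) kv hkv
      simp only [List.drop_zero] at h0
      rcases prefix_append_cases hpre with h | h
      · exact absurd h h0.2
      · exact absurd h h0.1
    | none =>
      rw [mrepl_cons_none T c t' hf] at hpre
      cases w with
      | nil => exact absurd rfl hw
      | cons wh wt =>
        rw [List.cons_prefix_cons] at hpre
        obtain ⟨hwc, hwt⟩ := hpre
        by_cases hwtn : wt = []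
        · subst hwc; subst hwtn
          exact List.cons_prefix_cons.mpr ⟨rfl, List.nil_prefix⟩
        · have hwt' : wt <+: t' := by
            apply ih wt hwtn
            · intro j hj kv hkv
              have := hsep (j+1) (by simpa using Nat.succ_lt_succ hj) kv hkv
              simpa using this
            · exact hwt
          subst hwc
          exact List.cons_prefix_cons.mpr ⟨rfl, hwt'⟩

-- peeling: composing the scan for table T with one more replace pass (key k, value v)
-- equals the scan for T with (k,v) appended, provided keys and values never interfere
theorem peel (T : List (List Char × List Char)) (k v : List Char)
    (hk2 : 2 ≤ k.length)
    (hsepk : ∀ j, j < k.length → ∀ kv ∈ T, ¬ kv.1 <+: k.drop j ∧ ¬ k.drop j <+: kv.1)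
    (hsepv : ∀ kv ∈ T, ∀ j, j < kv.2.length → ¬ k <+: kv.2.drop j ∧ ¬ kv.2.drop j <+: k)
    (hsepd : ∀ j, 1 ≤ j → j < k.length → ∀ kv ∈ T, ¬ kv.2 <+: k.drop j ∧ ¬ k.drop j <+: kv.2) :
    ∀ s, mrepl [(k, v)] (mrepl T s) = mrepl (T ++ [(k, v)]) s := by
  have hk : k ≠ [] := by cases k with | nil => simp at hk2 | cons a b => simp
  suffices H : ∀ n (s : List Char), s.length ≤ n →
      mrepl [(k, v)] (mrepl T s) = mrepl (T ++ [(k, v)]) s from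
    fun s => H s.length s le_rfl
  intro n
  induction n with
  | zero =>
    intro s hs
    have : s = [] := List.eq_nil_of_length_eq_zero (Nat.le_zero.mp hs)
    subst this
    simp [mrepl_nil]
  | succ n ih =>
    intro s hs
    cases s with
    | nil => simp [mrepl_nil]
    | cons c t =>
      cases hf : List.find? (fun p => !p.1.isEmpty && p.1.isPrefixOf (c :: t)) T with
      | some kv =>
        have hkv : kv ∈ T := List.mem_of_find?_eq_some hf
        have hpk := List.find?_some hf
        simp only [Bool.and_eq_true, Bool.not_eq_true', List.isPrefixOf_iff_prefix] at hpk
        have hkv1 : kv.1 ≠ [] := by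
          intro he; rw [he] at hpk; simp at hpk
        have h1 : 0 < kv.1.length := List.length_pos_iff.mpr hkv1
        have hf' : List.find? (fun p => !p.1.isEmpty && p.1.isPrefixOf (c :: t)) (T ++ [(k, v)]) = some kv := by
          rw [List.find?_append, hf]; rfl
        rw [mrepl_cons_some T c t kv hf, mrepl_cons_some _ c t kv hf']
        rw [mrepl_skip [(k, v)] kv.2 _ (by
          intro j hj kv' hkv'
          simp only [List.mem_singleton] at hkv'
          subst hkv'
          exact hsepv kv hkv j hj)]
        congr 1
        apply ih
        simp only [List.length_drop, List.length_cons]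
        simp only [List.length_cons] at hs
        omega
      | none =>
        by_cases hp : k <+: (c :: t)
        · obtain ⟨r, hr⟩ := hp
          have hlr : r.length ≤ n := by
            have hlen := congrArg List.length hr
            simp only [List.length_append, List.length_cons] at hlen
            simp only [List.length_cons] at hs
            omega
          -- RHS: the appended key (k, v) is the first match at the head
          have hkp : k.isPrefixOf (c :: t) = true := List.isPrefixOf_iff_prefix.mpr ⟨r, hr⟩
          have hke : k.isEmpty = false := by
            cases k with | nil => exact absurd rfl hk | cons _ _ => rfl
          have hfR : List.find? (fun p => !p.1.isEmpty && p.1.isPrefixOf (c :: t)) (T ++ [(k, v)]) = some (k, v) := by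
            rw [List.find?_append, hf]
            simp [List.find?, hkp, hke]
          rw [mrepl_cons_some _ c t (k, v) hfR]
          -- LHS: T skips over the whole of k, then the single-key scan fires
          rw [← hr, mrepl_skip T k r hsepk]
          cases k with
          | nil => exact absurd rfl hk
          | cons kh kt =>
            have hpre2 : (kh :: kt) <+: kh :: (kt ++ mrepl T r) := ⟨mrepl T r, rfl⟩
            have hfL : List.find? (fun p => !p.1.isEmpty && p.1.isPrefixOf (kh :: (kt ++ mrepl T r))) [(kh :: kt, v)] = some (kh :: kt, v) := by
              simp [List.find?, List.isPrefixOf_iff_prefix.mpr hpre2]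
            simp only [List.cons_append]
            rw [mrepl_cons_some _ kh (kt ++ mrepl T r) (kh :: kt, v) hfL]
            simp only [List.length_cons, List.drop_succ_cons, List.drop_left]
            congr 1
            exact ih r hlr
        · -- no key matches at the head at all
          have hkpf : k.isPrefixOf (c :: t) = false := by
            rw [Bool.eq_false_iff]
            intro hx
            exact hp (List.isPrefixOf_iff_prefix.mp hx)
          have hfR : List.find? (fun p => !p.1.isEmpty && p.1.isPrefixOf (c :: t)) (T ++ [(k, v)]) = none := by
            rw [List.find?_append, hf]
            simp [List.find?, hkpf]
          rw [mrepl_cons_none T c t hf, mrepl_cons_none _ c t hfR]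
          -- the single-key scan does not fire on c :: mrepl T t either
          have hnotk : ¬ k <+: c :: mrepl T t := by
            intro hcon
            cases hkc : k with
            | nil => exact hk hkc
            | cons kh kt =>
              rw [hkc, List.cons_prefix_cons] at hcon
              obtain ⟨hc1, hc2⟩ := hcon
              have hktne : kt ≠ [] := by
                intro he; rw [hkc, he] at hk2; simp at hk2
              have hsep' : ∀ j, j < kt.length → ∀ kv ∈ T, ¬ kv.2 <+: kt.drop j ∧ ¬ kt.drop j <+: kv.2 := by
                intro j hj kv hkv
                have hjk : j + 1 < k.length := by rw [hkc]; simpa using Nat.succ_lt_succ hj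
                have := hsepd (j+1) (by omega) hjk kv hkv
                rw [hkc] at this
                simpa using this
              have hwt := nopfx T t kt hktne hsep' hc2
              exact hp (by rw [hkc, hc1]; exact List.cons_prefix_cons.mpr ⟨rfl, hwt⟩)
          have hfL : List.find? (fun p => !p.1.isEmpty && p.1.isPrefixOf (c :: mrepl T t)) [(k, v)] = none := by
            have hx : k.isPrefixOf (c :: mrepl T t) = false := by
              rw [Bool.eq_false_iff]
              intro hx
              exact hnotk (List.isPrefixOf_iff_prefix.mp hx)
            simp [List.find?, hx]
          rw [mrepl_cons_none _ c (mrepl T t) hfL]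
          have hlt : t.length ≤ n := by
            simp only [List.length_cons] at hs
            omega
          rw [ih t hlt]

-- Python's str.replace (one pass, nonempty pattern) is the single-key table scan
theorem go_eq (k v : List Char) (hk : k ≠ []) :
    ∀ (fuel : Nat) (s acc : List Char), s.length ≤ fuel →
      PySem.Chars.replace.go k v fuel s acc = acc.reverse ++ mrepl [(k, v)] s := by
  have hke : k.isEmpty = false := by cases k with | nil => exact absurd rfl hk | cons _ _ => rfl
  intro fuel
  induction fuel with
  | zero =>
    intro s acc hs
    have : s = [] := List.eq_nil_of_length_eq_zero (Nat.le_zero.mp hs)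
    subst this
    rw [PySem.Chars.replace.go.eq_def]
    simp [mrepl_nil]
  | succ fuel ih =>
    intro s acc hs
    cases s with
    | nil =>
      rw [PySem.Chars.replace.go.eq_def]
      simp [mrepl_nil]
    | cons c t =>
      rw [PySem.Chars.replace.go.eq_def]
      by_cases hpre : k.isPrefixOf (c :: t) = true
      · have hfind : List.find? (fun p => !p.1.isEmpty && p.1.isPrefixOf (c :: t)) [(k, v)] = some (k, v) := by
          simp [List.find?, hpre, hke]
        have hk1 : 0 < k.length := List.length_pos_iff.mpr hk
        have hlen : ((c :: t).drop k.length).length ≤ fuel := by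
          simp only [List.length_drop, List.length_cons]
          simp only [List.length_cons] at hs
          omega
        simp only [hpre, if_true]
        rw [ih _ (v.reverse ++ acc) hlen, mrepl_cons_some _ c t (k, v) hfind]
        simp
      · have hfind : List.find? (fun p => !p.1.isEmpty && p.1.isPrefixOf (c :: t)) [(k, v)] = none := by
          simp only [Bool.not_eq_true] at hpre
          simp [List.find?, hpre]
        have hlen : t.length ≤ fuel := by
          simp only [List.length_cons] at hs
          omega
        simp only [Bool.not_eq_true] at hpre
        simp only [hpre]
        rw [ih t (c :: acc) hlen, mrepl_cons_none _ c t hfind]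
        simp

theorem replace_eq_mrepl (s k v : List Char) (hk : k ≠ []) :
    PySem.Chars.replace s k v = mrepl [(k, v)] s := by
  have hke : k.isEmpty = false := by cases k with | nil => exact absurd rfl hk | cons _ _ => rfl
  rw [PySem.Chars.replace, hke]
  simpa using go_eq k v hk s.length s [] le_rfl

-- ===== VERDICT (by name: the statement is the Claim_ definition above) =====
theorem fix_missing_type_definitions_spec : Claim_equal_fix_missing_type_definitions := by
  intro content _
  unfold Spec_fix_missing_type_definitions fix_missing_type_definitions fix_missing_type_definitions_alt
  simp only [PySem.Str.replace, String.toList_ofList]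
  congr 1
  rw [replace_eq_mrepl _ _ _ (by decide), replace_eq_mrepl _ _ _ (by decide),
      replace_eq_mrepl _ _ _ (by decide), replace_eq_mrepl _ _ _ (by decide)]
  rw [peel [("FPCM_UnifiedTerrainSystem".toList, "UnifiedTerrainSystem".toList)]
        "FPCM_PreBattleUI".toList "Node".toList (by decide) (by decide) (by decide) (by decide)]
  simp only [List.cons_append, List.nil_append]
  rw [peel [("FPCM_UnifiedTerrainSystem".toList, "UnifiedTerrainSystem".toList),
            ("FPCM_PreBattleUI".toList, "Node".toList)]
        "FPCM_CampaignManager".toList "CampaignManager".toList (by decide) (by decide) (by decide) (by decide)]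
  simp only [List.cons_append, List.nil_append]
  rw [peel [("FPCM_UnifiedTerrainSystem".toList, "UnifiedTerrainSystem".toList),
            ("FPCM_PreBattleUI".toList, "Node".toList),
            ("FPCM_CampaignManager".toList, "CampaignManager".toList)]
        "FPCM_Character".toList "Character".toList (by decide) (by decide) (by decide) (by decide)]
  simp [fpcmTable]
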